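-- pv_equiv track=rewrite | github.com/AKleriX/codewars-tasks | Connect Four - placing tokens/task-solution.py | connect_four_place
-- ===== SOURCE A (Python) =====
-- def connect_four_place(c):
--     b=[['-']*7 for _ in range(6)]
--     for i,x in enumerate(c):
--         p='YR'[i&1]
--         for r in range(5,-1,-1):
--             if b[r][x]=='-':
--                 b[r][x]=p;break
--     return b
-- ===== SOURCE B (Python) =====
-- def connect_four_place(c):
--     b = [['-'] * 7 for _ in range(6)]
--     height = [0] * 7
--     for i, x in enumerate(c):
--         if height[x] < 6:
--             b[5 - height[x]][x] = 'YR'[i & 1]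
--             height[x] += 1
--     return b
-- ===== Notes on version B (the rewrite author's own statement) =====
-- stated objective: faster
-- what changed: Replaces A's bottom-up scan of the column for the first empty cell on every move by a per-column height array that gives the target row directly in O(1) per move.
import Mathlib
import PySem

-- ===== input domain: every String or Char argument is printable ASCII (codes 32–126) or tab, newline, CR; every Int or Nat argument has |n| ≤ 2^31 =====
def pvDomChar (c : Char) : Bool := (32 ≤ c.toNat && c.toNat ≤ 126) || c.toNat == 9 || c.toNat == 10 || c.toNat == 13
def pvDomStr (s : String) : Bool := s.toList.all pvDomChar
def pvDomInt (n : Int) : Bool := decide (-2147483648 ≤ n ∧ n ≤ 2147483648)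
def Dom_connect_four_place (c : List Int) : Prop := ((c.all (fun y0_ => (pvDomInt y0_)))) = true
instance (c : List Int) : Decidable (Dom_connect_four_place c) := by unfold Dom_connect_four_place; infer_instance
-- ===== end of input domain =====

-- B replaces A's per-move bottom-up row scan by a per-column height array giving the target row directly.

-- ===== PORT A =====
-- inner loop 'for r in range(5,-1,-1): if b[r][x]=='-': b[r][x]=p; break'
def pvPlaceA (b : List (List String)) (x : Int) (p : String) : List Int → List (List String)
  | [] => b
  | r :: rs =>
    let row := PySem.List.pyGetD b r []
    if PySem.List.pyGetD row x "" == "-" then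
      PySem.List.pySetD b r (PySem.List.pySetD row x p)
    else pvPlaceA b x p rs

def connect_four_place (c : List Int) : List (List String) :=
  let b0 := List.replicate 6 (List.replicate 7 "-")
  (PySem.List.enumerate c).foldl (fun b ix =>
    -- 'YR'[i&1] ported by hand: i ≥ 0 so i&1 is 0 or 1; exact
    let p := if PySem.Int.band ix.1 1 = 0 then "Y" else "R"
    pvPlaceA b ix.2 p (PySem.List.pyRange 5 (-1) (-1))) b0

-- ===== PORT B =====
def connect_four_place_alt (c : List Int) : List (List String) :=
  let b0 := List.replicate 6 (List.replicate 7 "-")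
  let h0 : List Int := List.replicate 7 0
  ((PySem.List.enumerate c).foldl (fun (s : List (List String) × List Int) ix =>
    let x := ix.2
    let hx := PySem.List.pyGetD s.2 x 0
    if hx < 6 then
      let r : Int := 5 - hx
      let row := PySem.List.pyGetD s.1 r []
      -- 'YR'[i&1] ported by hand as in port A; exact
      (PySem.List.pySetD s.1 r (PySem.List.pySetD row x (if PySem.Int.band ix.1 1 = 0 then "Y" else "R")),
       PySem.List.pySetD s.2 x (hx + 1))
    else s) (b0, h0)).1

-- ===== PRECONDITION & SPEC =====
-- Pre_ excludes exactly the inputs containing a column value that is not a valid Python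
-- index into a 7-element row (x < -7 or 7 <= x), on which both A and B raise IndexError.
def Pre_connect_four_place (c : List Int) : Prop := ∀ x ∈ c, -7 ≤ x ∧ x < 7
instance (c : List Int) : Decidable (Pre_connect_four_place c) := by unfold Pre_connect_four_place; infer_instance
def pvWitness_connect_four_place : List Int := [0, 3, 0, -1, 6, 3, 0]

def Spec_connect_four_place (c : List Int) (out : List (List String)) : Prop := out = connect_four_place_alt c
instance (c : List Int) (out : List (List String)) : Decidable (Spec_connect_four_place c out) := by unfold Spec_connect_four_place; infer_instance

-- ===== CLAIM (what is proved, stated in full; the proofs are below) =====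
def Claim_equal_connect_four_place : Prop := ∀ (c : List Int), Dom_connect_four_place c → Pre_connect_four_place c → Spec_connect_four_place c (connect_four_place c)

-- ===== LEMMAS AND PROOFS =====
def pvJdx (n : Nat) (x : Int) : Nat := if 0 ≤ x then x.toNat else n - (-x).toNat

theorem pvJdx_lt {n : Nat} {x : Int} (h1 : -(n:Int) ≤ x) (h2 : x < n) : pvJdx n x < n := by
  unfold pvJdx; split_ifs <;> omega

theorem pvGetDn {α : Type} (xs : List α) {x : Int}
    (h1 : -(xs.length:Int) ≤ x) (h2 : x < xs.length) (d : α) :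
    PySem.List.pyGetD xs x d = xs.getD (pvJdx xs.length x) d := by
  simp only [PySem.List.pyGetD, PySem.List.pyGet?, PySem.List.pyIdx?, pvJdx]
  split_ifs <;> first | omega | simp [List.getD]

theorem pvSetDn {α : Type} (xs : List α) {x : Int}
    (h1 : -(xs.length:Int) ≤ x) (h2 : x < xs.length) (v : α) :
    PySem.List.pySetD xs x v = xs.set (pvJdx xs.length x) v := by
  simp only [PySem.List.pySetD, PySem.List.pySet?, PySem.List.pyIdx?, pvJdx]
  split_ifs <;> first | omega | simp

theorem pvJdx_nat (n m : Nat) : pvJdx n (m : Int) = m := by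
  unfold pvJdx; simp

theorem pvGetD_nat {α : Type} (xs : List α) (n : Nat) (hn : n < xs.length) (d : α) :
    PySem.List.pyGetD xs (n : Int) d = xs.getD n d := by
  rw [pvGetDn xs (by omega) (by omega), pvJdx_nat]

theorem pvSetD_nat {α : Type} (xs : List α) (n : Nat) (hn : n < xs.length) (v : α) :
    PySem.List.pySetD xs (n : Int) v = xs.set n v := by
  rw [pvSetDn xs (by omega) (by omega), pvJdx_nat]

theorem pvGetDset {α : Type} (xs : List α) (n m : Nat) (v d : α) (hn : n < xs.length) :
    (xs.set n v).getD m d = if m = n then v else xs.getD m d := by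
  by_cases hm : m = n
  · subst hm
    simp [List.getD, hn]
  · simp only [List.getD, List.getElem?_set]
    split_ifs with h1 <;> first | rfl | (exact absurd h1.symm hm)

-- the invariant tying the board to the height list
def pvInv (b : List (List String)) (h : List Int) : Prop :=
  b.length = 6 ∧ h.length = 7 ∧ (∀ r < 6, (b.getD r []).length = 7) ∧
  ∀ j < 7, 0 ≤ h.getD j 0 ∧ h.getD j 0 ≤ 6 ∧
    ∀ r < 6, ((b.getD r []).getD j "" = "-" ↔ (r : Int) < 6 - h.getD j 0)

-- the common "drop a token" result, expressed with Nat indices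
def pvDrop (b : List (List String)) (hj : Int) (j : Nat) (p : String) : List (List String) :=
  if hj < 6 then
    b.set (5 - hj.toNat) ((b.getD (5 - hj.toNat) []).set j p)
  else b

theorem pvInv_init : pvInv (List.replicate 6 (List.replicate 7 "-")) (List.replicate 7 0) := by
  refine ⟨rfl, rfl, ?_, ?_⟩ <;> intro j hj
  · interval_cases j <;> rfl
  · refine ⟨?_, ?_, ?_⟩
    · interval_cases j <;> simp
    · interval_cases j <;> simp
    · intro r hr; interval_cases j <;> interval_cases r <;> simp

theorem pvStepA {b : List (List String)} {h : List Int} (inv : pvInv b h) {x : Int}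
    (h1 : -7 ≤ x) (h2 : x < 7) {p : String} :
    pvPlaceA b x p [5, 4, 3, 2, 1, 0] = pvDrop b (h.getD (pvJdx 7 x) 0) (pvJdx 7 x) p := by
  obtain ⟨hb6, hh7, hrow, hcol⟩ := inv
  set j := pvJdx 7 x with hj
  have hjlt : j < 7 := pvJdx_lt (by omega) (by omega)
  obtain ⟨hge, hle, hcell⟩ := hcol j hjlt
  set hgt := h.getD j 0 with hhgt
  have hget : ∀ r : Nat, r < 6 → PySem.List.pyGetD (b.getD r []) x "" = (b.getD r []).getD j "" := by
    intro r hr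
    rw [pvGetDn _ (by rw [hrow r hr]; omega) (by rw [hrow r hr]; omega), hrow r hr]
  have hsetrow : ∀ r : Nat, r < 6 → PySem.List.pySetD (b.getD r []) x p = (b.getD r []).set j p := by
    intro r hr
    rw [pvSetDn _ (by rw [hrow r hr]; omega) (by rw [hrow r hr]; omega), hrow r hr]
  have e5 : PySem.List.pyGetD b (5:Int) [] = b.getD 5 [] := pvGetD_nat b 5 (by omega) []
  have e4 : PySem.List.pyGetD b (4:Int) [] = b.getD 4 [] := pvGetD_nat b 4 (by omega) []
  have e3 : PySem.List.pyGetD b (3:Int) [] = b.getD 3 [] := pvGetD_nat b 3 (by omega) []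
  have e2 : PySem.List.pyGetD b (2:Int) [] = b.getD 2 [] := pvGetD_nat b 2 (by omega) []
  have e1 : PySem.List.pyGetD b (1:Int) [] = b.getD 1 [] := pvGetD_nat b 1 (by omega) []
  have e0 : PySem.List.pyGetD b (0:Int) [] = b.getD 0 [] := pvGetD_nat b 0 (by omega) []
  have s5 : ∀ row, PySem.List.pySetD b (5:Int) row = b.set 5 row := fun row => pvSetD_nat b 5 (by omega) row
  have s4 : ∀ row, PySem.List.pySetD b (4:Int) row = b.set 4 row := fun row => pvSetD_nat b 4 (by omega) row
  have s3 : ∀ row, PySem.List.pySetD b (3:Int) row = b.set 3 row := fun row => pvSetD_nat b 3 (by omega) row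
  have s2 : ∀ row, PySem.List.pySetD b (2:Int) row = b.set 2 row := fun row => pvSetD_nat b 2 (by omega) row
  have s1 : ∀ row, PySem.List.pySetD b (1:Int) row = b.set 1 row := fun row => pvSetD_nat b 1 (by omega) row
  have s0 : ∀ row, PySem.List.pySetD b (0:Int) row = b.set 0 row := fun row => pvSetD_nat b 0 (by omega) row
  have c5 := hcell 5 (by norm_num)
  have c4 := hcell 4 (by norm_num)
  have c3 := hcell 3 (by norm_num)
  have c2 := hcell 2 (by norm_num)
  have c1 := hcell 1 (by norm_num)
  have c0 := hcell 0 (by norm_num)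
  simp only [List.getD] at c5 c4 c3 c2 c1 c0
  interval_cases hgt <;>
    simp only [pvPlaceA, pvDrop, e5, e4, e3, e2, e1, e0,
      hget 5 (by norm_num), hget 4 (by norm_num), hget 3 (by norm_num),
      hget 2 (by norm_num), hget 1 (by norm_num), hget 0 (by norm_num),
      hsetrow 5 (by norm_num), hsetrow 4 (by norm_num), hsetrow 3 (by norm_num),
      hsetrow 2 (by norm_num), hsetrow 1 (by norm_num), hsetrow 0 (by norm_num),
      s5, s4, s3, s2, s1, s0] <;>
    norm_num [c5, c4, c3, c2, c1, c0] <;> rfl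

theorem pvStepB {b : List (List String)} {h : List Int} (inv : pvInv b h) {x : Int}
    (h1 : -7 ≤ x) (h2 : x < 7) (p : String) :
    (let hx := PySem.List.pyGetD h x 0
     if hx < 6 then
       let r : Int := 5 - hx
       let row := PySem.List.pyGetD b r []
       (PySem.List.pySetD b r (PySem.List.pySetD row x p), PySem.List.pySetD h x (hx + 1))
     else (b, h)) =
    (pvDrop b (h.getD (pvJdx 7 x) 0) (pvJdx 7 x) p,
     if h.getD (pvJdx 7 x) 0 < 6 then h.set (pvJdx 7 x) (h.getD (pvJdx 7 x) 0 + 1) else h) := by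
  obtain ⟨hb6, hh7, hrow, hcol⟩ := inv
  set j := pvJdx 7 x with hj
  have hjlt : j < 7 := pvJdx_lt (by omega) (by omega)
  obtain ⟨hge, hle, -⟩ := hcol j hjlt
  have hgetH : PySem.List.pyGetD h x 0 = h.getD j 0 := by
    rw [pvGetDn h (by omega) (by omega), hh7]
  set hgt := h.getD j 0 with hhgt
  by_cases hcase : hgt < 6
  · have hr0 : (5 - hgt) = ((5 - hgt.toNat : Nat) : Int) := by omega
    have hrowb : PySem.List.pyGetD b (5 - hgt) [] = b.getD (5 - hgt.toNat) [] := by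
      rw [hr0, pvGetD_nat b (5 - hgt.toNat) (by omega) []]
    have hrlen : (b.getD (5 - hgt.toNat) []).length = 7 := hrow _ (by omega)
    have hsetrow : PySem.List.pySetD (b.getD (5 - hgt.toNat) []) x p
        = (b.getD (5 - hgt.toNat) []).set j p := by
      rw [pvSetDn _ (by rw [hrlen]; omega) (by rw [hrlen]; omega), hrlen]
    have hsetb : ∀ row, PySem.List.pySetD b (5 - hgt) row = b.set (5 - hgt.toNat) row := by
      intro row
      rw [hr0, pvSetD_nat b (5 - hgt.toNat) (by omega) row]
    have hsetH : PySem.List.pySetD h x (hgt + 1) = h.set j (hgt + 1) := by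
      rw [pvSetDn h (by omega) (by omega), hh7]
    simp only [hgetH, if_pos hcase, hrowb, hsetrow, hsetb, hsetH, pvDrop]
  · simp only [hgetH, if_neg hcase, pvDrop]

theorem pvInv_step {b : List (List String)} {h : List Int} (inv : pvInv b h)
    {j : Nat} (hjlt : j < 7) (hcase : h.getD j 0 < 6) {p : String} (hp : p ≠ "-") :
    pvInv (b.set (5 - (h.getD j 0).toNat) ((b.getD (5 - (h.getD j 0).toNat) []).set j p))
          (h.set j (h.getD j 0 + 1)) := by
  obtain ⟨hb6, hh7, hrow, hcol⟩ := inv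
  obtain ⟨hge, hle, hcell⟩ := hcol j hjlt
  set hgt := h.getD j 0 with hhgt
  set r0 : Nat := 5 - hgt.toNat with hr0
  have hr0lt : r0 < 6 := by omega
  refine ⟨by simp [hb6], by simp [hh7], ?_, ?_⟩
  · intro r hr
    rw [pvGetDset b r0 r _ [] (by omega)]
    split_ifs with he
    · rw [List.length_set]
      exact hrow r0 hr0lt
    · exact hrow r hr
  · intro j' hj'
    have hH : (h.set j (hgt + 1)).getD j' 0 = if j' = j then hgt + 1 else h.getD j' 0 :=
      pvGetDset h j j' _ 0 (by omega)
    refine ⟨?_, ?_, ?_⟩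
    · rw [hH]; split_ifs <;> [omega; exact (hcol j' hj').1]
    · rw [hH]; split_ifs <;> [omega; exact (hcol j' hj').2.1]
    · intro r hr
      rw [hH, pvGetDset b r0 r _ [] (by omega)]
      by_cases hrr : r = r0
      · rw [if_pos hrr, hrr]
        by_cases hjj : j' = j
        · rw [if_pos hjj, hjj, pvGetDset _ j j p "" (by rw [hrow r0 hr0lt]; omega), if_pos rfl]
          constructor
          · intro hpe; exact absurd hpe hp
          · intro hlt; omega
        · rw [if_neg hjj, pvGetDset _ j j' p "" (by rw [hrow r0 hr0lt]; omega), if_neg hjj]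
          exact (hcol j' hj').2.2 r0 hr0lt
      · rw [if_neg hrr]
        by_cases hjj : j' = j
        · rw [if_pos hjj, hjj]
          have hc := hcell r hr
          constructor
          · intro hpe
            have := hc.1 hpe
            omega
          · intro hlt
            exact hc.2 (by omega)
        · rw [if_neg hjj]
          exact (hcol j' hj').2.2 r hr

theorem pvRange56 : PySem.List.pyRange 5 (-1) (-1) = [5, 4, 3, 2, 1, 0] := by decide

def pvFa : List (List String) → Int × Int → List (List String) := fun b ix =>
  let p := if PySem.Int.band ix.1 1 = 0 then "Y" else "R"
  pvPlaceA b ix.2 p (PySem.List.pyRange 5 (-1) (-1))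

def pvFb : (List (List String) × List Int) → Int × Int → (List (List String) × List Int) :=
  fun s ix =>
    let x := ix.2
    let hx := PySem.List.pyGetD s.2 x 0
    if hx < 6 then
      let r : Int := 5 - hx
      let row := PySem.List.pyGetD s.1 r []
      (PySem.List.pySetD s.1 r (PySem.List.pySetD row x (if PySem.Int.band ix.1 1 = 0 then "Y" else "R")),
       PySem.List.pySetD s.2 x (hx + 1))
    else s

theorem pvInv_drop {b : List (List String)} {h : List Int} (inv : pvInv b h)
    {j : Nat} (hjlt : j < 7) {p : String} (hp : p ≠ "-") :
    pvInv (pvDrop b (h.getD j 0) j p) (if h.getD j 0 < 6 then h.set j (h.getD j 0 + 1) else h) := by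
  by_cases hc : h.getD j 0 < 6
  · rw [if_pos hc]; unfold pvDrop; rw [if_pos hc]; exact pvInv_step inv hjlt hc hp
  · rw [if_neg hc]; unfold pvDrop; rw [if_neg hc]; exact inv

theorem pvMain (xs : List Int) : ∀ (i : Int) (b : List (List String)) (h : List Int),
    pvInv b h → (∀ x ∈ xs, -7 ≤ x ∧ x < 7) →
    (PySem.List.enumerate xs i).foldl pvFa b = ((PySem.List.enumerate xs i).foldl pvFb (b, h)).1 := by
  induction xs with
  | nil => intro i b h inv hbound; rfl
  | cons x xs ih =>
    intro i b h inv hbound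
    obtain ⟨hx1, hx2⟩ := hbound x (by simp)
    rw [PySem.List.enumerate_cons]
    simp only [List.foldl_cons]
    have hp : (if PySem.Int.band i 1 = 0 then "Y" else "R") ≠ "-" := by split_ifs <;> decide
    have hA : pvFa b (i, x) = pvDrop b (h.getD (pvJdx 7 x) 0) (pvJdx 7 x)
        (if PySem.Int.band i 1 = 0 then "Y" else "R") := by
      show pvPlaceA b x _ (PySem.List.pyRange 5 (-1) (-1)) = _
      rw [pvRange56]
      exact pvStepA ⟨inv.1, inv.2.1, inv.2.2.1, inv.2.2.2⟩ hx1 hx2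
    have hB : pvFb (b, h) (i, x) =
        (pvDrop b (h.getD (pvJdx 7 x) 0) (pvJdx 7 x) (if PySem.Int.band i 1 = 0 then "Y" else "R"),
         if h.getD (pvJdx 7 x) 0 < 6 then h.set (pvJdx 7 x) (h.getD (pvJdx 7 x) 0 + 1) else h) :=
      pvStepB inv hx1 hx2 _
    rw [hA, hB]
    exact ih (i + 1) _ _ (pvInv_drop inv (pvJdx_lt (by omega) (by omega)) hp)
      (fun y hy => hbound y (List.mem_cons_of_mem _ hy))

-- ===== VERDICT (by name: the statement is the Claim_ definition above) =====
theorem connect_four_place_spec : Claim_equal_connect_four_place := by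
  unfold Claim_equal_connect_four_place Spec_connect_four_place
  intro c _ hpre
  exact pvMain c 0 _ _ pvInv_init (fun x hx => hpre x hx)
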